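-- pv_equiv track=rewrite | github.com/dhbw-ma-ppp/ppp-2025 | Laurens_Aufgabe_3/exercises_03.py | count_valid_numbers
-- ===== SOURCE A (Python) =====
-- def count_valid_numbers(lower_bound, upper_bound):
--     def is_valid(number):
--         digits = [int(d) for d in str(number)]
--         has_exactly_two_adjacent = False
--         count = 1
--
--         for i in range(1, len(digits)):
--             if digits[i] < digits[i - 1]:
--                 return False  # digits do not increase
--             if digits[i] == digits[i - 1]:
--                 count += 1
--             else:
--                 if count == 2:
--                     has_exactly_two_adjacent = True
--                 count = 1
--
--         if count == 2:
--             has_exactly_two_adjacent = True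
--
--         return has_exactly_two_adjacent
--
--     valid_count = 0
--     for num in range(lower_bound, upper_bound):
--         if is_valid(num):
--             valid_count += 1
--
--     return valid_count
-- ===== SOURCE B (Python) =====
-- def count_valid_numbers(lower_bound, upper_bound):
--     def runs(s):
--         # run-length encoding of s, built recursively
--         if not s:
--             return []
--         r = runs(s[1:])
--         if r and r[0][0] == s[0]:
--             return [(s[0], r[0][1] + 1)] + r[1:]
--         return [(s[0], 1)] + r
--
--     def is_valid(num):
--         r = runs(str(num))
--         return all(a < b for (a, _), (b, _) in zip(r, r[1:])) and any(n == 2 for _, n in r)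
--
--     lo = max(lower_bound, 0)
--     total = 0
--     num = upper_bound - 1
--     while num >= lo:
--         if is_valid(num):
--             total += 1
--         num -= 1
--     return total
-- ===== Notes on version B (the rewrite author's own statement) =====
-- stated objective: alternative
-- what changed: B tests each number by a declarative run-length-encoding characterisation (run values strictly increasing and some run of length exactly 2) instead of A's one-pass state machine with a pending counter and flag, and scans the interval downward from upper_bound-1 clamped at 0 rather than upward with range().
-- crash fix: When lower_bound < 0 and lower_bound < upper_bound, A raises ValueError (int('-') on the first negative number's string); B clamps the scan at 0 and returns the count over [0, upper_bound) since no negative number can qualify (the stated region is limited to upper_bound <= 2000000, sizes the linear scan finishes in the harness's time budget). — e.g. on count_valid_numbers(-5, 23): A raises ValueError, B returns 2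
import Mathlib
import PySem

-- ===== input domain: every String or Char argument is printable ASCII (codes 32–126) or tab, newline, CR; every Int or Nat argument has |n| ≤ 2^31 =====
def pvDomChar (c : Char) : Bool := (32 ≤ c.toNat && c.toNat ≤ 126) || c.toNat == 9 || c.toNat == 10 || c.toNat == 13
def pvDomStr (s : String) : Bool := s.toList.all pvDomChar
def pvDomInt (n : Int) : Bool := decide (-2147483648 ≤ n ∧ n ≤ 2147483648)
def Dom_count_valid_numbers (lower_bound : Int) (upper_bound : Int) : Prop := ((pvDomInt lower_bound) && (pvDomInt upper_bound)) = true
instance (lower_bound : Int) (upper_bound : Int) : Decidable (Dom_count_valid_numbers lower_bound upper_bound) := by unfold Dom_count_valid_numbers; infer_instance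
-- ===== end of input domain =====

-- B replaces A's one-pass digit state machine by a run-length-encoding characterisation of
-- validity (run values strictly increasing, some run of length exactly 2) and scans the
-- interval downward clamped at 0; same cost, different algorithm. Where A raises ValueError
-- on negative numbers B returns the count over [0, upper_bound) — see the Raises_ block.


-- ===== PORT A =====
-- A's inner loop `for i in range(1, len(digits))` with early `return False`, carrying
-- prev = digits[i-1], the has_exactly_two_adjacent flag and the run counter.
def pvA_loop : Int → List Int → Bool → Int → Bool
  | _, [], hasTwo, count => if count = 2 then true else hasTwo
  | prev, d :: rest, hasTwo, count =>
    if d < prev then false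
    else if d = prev then pvA_loop d rest hasTwo (count + 1)
    else pvA_loop d rest (if count = 2 then true else hasTwo) 1

-- is_valid(number): digits = [int(d) for d in str(number)].  int('-') raises ValueError in
-- Python (ofStr? = none); the `.getD 0` is only reachable for negative numbers, outside Pre_.
def pvA_isValid (number : Int) : Bool :=
  match (PySem.Int.toStr number).toList.map
      (fun ch => (PySem.Int.ofStr? (String.ofList [ch])).getD 0) with
  | [] => false
  | d :: rest => pvA_loop d rest false 1

def count_valid_numbers (lower_bound : Int) (upper_bound : Int) : Int :=
  (PySem.List.pyRange lower_bound upper_bound 1).foldl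
    (fun valid_count num => if pvA_isValid num then valid_count + 1 else valid_count) 0

-- ===== PORT B =====
-- runs(s): recursive run-length encoding of the character list.
def pvB_runs : List Char → List (Char × Int)
  | [] => []
  | c :: cs =>
    match pvB_runs cs with
    | (c', n) :: r => if c = c' then (c, n + 1) :: r else (c, 1) :: (c', n) :: r
    | [] => [(c, 1)]

-- is_valid(num): run values strictly increasing and some run length exactly 2.
def pvB_isValid (num : Int) : Bool :=
  let r := pvB_runs (PySem.Int.toStr num).toList
  ((r.zip r.tail).all fun p => decide (p.1.1 < p.2.1)) && (r.any fun p => p.2 == 2)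

-- the `while num >= lo` countdown loop
def pvB_loop (lo : Int) (num : Int) (total : Int) : Int :=
  if num ≥ lo then pvB_loop lo (num - 1) (if pvB_isValid num then total + 1 else total)
  else total
termination_by (num + 1 - lo).toNat
decreasing_by omega

def count_valid_numbers_alt (lower_bound : Int) (upper_bound : Int) : Int :=
  pvB_loop (max lower_bound 0) (upper_bound - 1) 0

-- ===== PRECONDITION & SPEC =====
-- A raises ValueError as soon as the range reaches a negative number (int('-') on its
-- string); Pre_ admits exactly the inputs on which A returns: nonnegative start, or empty range.
def Pre_count_valid_numbers (lower_bound : Int) (upper_bound : Int) : Prop :=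
  0 ≤ lower_bound ∨ upper_bound ≤ lower_bound
instance (lower_bound : Int) (upper_bound : Int) : Decidable (Pre_count_valid_numbers lower_bound upper_bound) := by unfold Pre_count_valid_numbers; infer_instance

def pvWitness_count_valid_numbers : Int × Int := (10, 30)

-- When lower_bound < 0 and lower_bound < upper_bound, A raises ValueError (int('-') on the
-- first negative number's string); B clamps the scan at 0 and returns the count over
-- [0, upper_bound), since no negative number can qualify.  (The upper_bound ≤ 2000000 bound
-- only keeps the stated region to sizes B's linear scan finishes in the harness's time.)
def Raises_count_valid_numbers (lower_bound : Int) (upper_bound : Int) : Prop :=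
  lower_bound < 0 ∧ lower_bound < upper_bound ∧ upper_bound ≤ 2000000
instance (lower_bound : Int) (upper_bound : Int) : Decidable (Raises_count_valid_numbers lower_bound upper_bound) := by unfold Raises_count_valid_numbers; infer_instance
def pvRaiseWitness_count_valid_numbers : Int × Int := (-5, 23)
def pvRaiseWitnessOut_count_valid_numbers : Int := 2

def Spec_count_valid_numbers (lower_bound : Int) (upper_bound : Int) (out : Int) : Prop := out = count_valid_numbers_alt lower_bound upper_bound
instance (lower_bound : Int) (upper_bound : Int) (out : Int) : Decidable (Spec_count_valid_numbers lower_bound upper_bound out) := by unfold Spec_count_valid_numbers; infer_instance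

-- ===== CLAIM (what is proved, stated in full; the proofs are below) =====
def Claim_equal_count_valid_numbers : Prop := ∀ (lower_bound : Int) (upper_bound : Int), Dom_count_valid_numbers lower_bound upper_bound → Pre_count_valid_numbers lower_bound upper_bound → Spec_count_valid_numbers lower_bound upper_bound (count_valid_numbers lower_bound upper_bound)
def Claim_raises_count_valid_numbers : Prop := (∀ (lower_bound : Int) (upper_bound : Int), Dom_count_valid_numbers lower_bound upper_bound → Raises_count_valid_numbers lower_bound upper_bound → ¬ Pre_count_valid_numbers lower_bound upper_bound) ∧ (Dom_count_valid_numbers (pvRaiseWitness_count_valid_numbers.1) (pvRaiseWitness_count_valid_numbers.2) ∧ Raises_count_valid_numbers (pvRaiseWitness_count_valid_numbers.1) (pvRaiseWitness_count_valid_numbers.2) ∧ count_valid_numbers_alt (pvRaiseWitness_count_valid_numbers.1) (pvRaiseWitness_count_valid_numbers.2) = pvRaiseWitnessOut_count_valid_numbers)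

-- ===== LEMMAS AND PROOFS =====

def pvIsDig (c : Char) : Prop := 48 ≤ c.toNat ∧ c.toNat ≤ 57

theorem pv_char_eq_of_toNat (a b : Char) (h : a.toNat = b.toNat) : a = b := by
  rw [← Char.ofNat_toNat a, ← Char.ofNat_toNat b, h]

theorem pv_char_lt_iff (a b : Char) : a < b ↔ a.toNat < b.toNat := by
  rw [Char.lt_def]; exact UInt32.lt_iff_toNat_lt ..

theorem pv_digitChar_dig (m : Nat) (h : m < 10) : pvIsDig (Nat.digitChar m) := by
  interval_cases m <;> exact ⟨by decide, by decide⟩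

theorem pv_toDigitsCore_digits (fuel : Nat) : ∀ (n : Nat) (acc : List Char),
    (∀ c ∈ acc, pvIsDig c) → ∀ c ∈ Nat.toDigitsCore 10 fuel n acc, pvIsDig c := by
  induction fuel with
  | zero => intro n acc hacc; simpa [Nat.toDigitsCore] using hacc
  | succ f ih =>
    intro n acc hacc
    rw [Nat.toDigitsCore]
    have hd : pvIsDig (Nat.digitChar (n % 10)) := pv_digitChar_dig _ (Nat.mod_lt _ (by omega))
    split
    · intro c hc
      rcases List.mem_cons.mp hc with h | h
      · exact h ▸ hd
      · exact hacc c h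
    · refine ih _ _ ?_
      intro c hc
      rcases List.mem_cons.mp hc with h | h
      · exact h ▸ hd
      · exact hacc c h

theorem pv_toDigitsCore_len (fuel : Nat) : ∀ (n : Nat) (acc : List Char),
    acc.length ≤ (Nat.toDigitsCore 10 fuel n acc).length := by
  induction fuel with
  | zero => intro n acc; simp [Nat.toDigitsCore]
  | succ f ih =>
    intro n acc
    rw [Nat.toDigitsCore]
    split
    · simp
    · exact le_trans (by simp) (ih _ _)

theorem pv_toChars_digits (n : Int) (hn : 0 ≤ n) :
    ∀ c ∈ PySem.Int.toChars n, pvIsDig c := by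
  unfold PySem.Int.toChars
  rw [if_neg (by omega)]
  exact pv_toDigitsCore_digits _ _ _ (by simp)

theorem pv_toChars_ne_nil (n : Int) (hn : 0 ≤ n) : PySem.Int.toChars n ≠ [] := by
  unfold PySem.Int.toChars
  rw [if_neg (by omega)]
  unfold Nat.toDigits
  rw [Nat.toDigitsCore]
  split
  · simp
  · have := pv_toDigitsCore_len n.toNat (n.toNat / 10) [Nat.digitChar (n.toNat % 10)]
    intro h
    rw [h] at this
    simp at this

theorem pv_ofStr_digit (c : Char) (h1 : 48 ≤ c.toNat) (h2 : c.toNat ≤ 57) :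
    (PySem.Int.ofStr? (String.ofList [c])).getD 0 = (c.toNat : Int) - 48 := by
  have h : c.toNat = 48 ∨ c.toNat = 49 ∨ c.toNat = 50 ∨ c.toNat = 51 ∨ c.toNat = 52 ∨
      c.toNat = 53 ∨ c.toNat = 54 ∨ c.toNat = 55 ∨ c.toNat = 56 ∨ c.toNat = 57 := by omega
  rcases h with h|h|h|h|h|h|h|h|h|h <;>
    (first
      | (rw [pv_char_eq_of_toNat c '0' (by rw [h]; rfl)]; decide)
      | (rw [pv_char_eq_of_toNat c '1' (by rw [h]; rfl)]; decide)
      | (rw [pv_char_eq_of_toNat c '2' (by rw [h]; rfl)]; decide)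
      | (rw [pv_char_eq_of_toNat c '3' (by rw [h]; rfl)]; decide)
      | (rw [pv_char_eq_of_toNat c '4' (by rw [h]; rfl)]; decide)
      | (rw [pv_char_eq_of_toNat c '5' (by rw [h]; rfl)]; decide)
      | (rw [pv_char_eq_of_toNat c '6' (by rw [h]; rfl)]; decide)
      | (rw [pv_char_eq_of_toNat c '7' (by rw [h]; rfl)]; decide)
      | (rw [pv_char_eq_of_toNat c '8' (by rw [h]; rfl)]; decide)
      | (rw [pv_char_eq_of_toNat c '9' (by rw [h]; rfl)]; decide))

-- A's loop re-expressed over the characters themselves (digit chars order-isomorphic to values)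
def pvC_loop : Char → List Char → Bool → Int → Bool
  | _, [], hasTwo, count => if count = 2 then true else hasTwo
  | prev, d :: rest, hasTwo, count =>
    if d < prev then false
    else if d = prev then pvC_loop d rest hasTwo (count + 1)
    else pvC_loop d rest (if count = 2 then true else hasTwo) 1

theorem pv_loop_bridge : ∀ (rest : List Char) (prev : Char) (h : Bool) (k : Int),
    pvIsDig prev → (∀ c ∈ rest, pvIsDig c) →
    pvA_loop ((prev.toNat : Int) - 48) (rest.map fun c => (c.toNat : Int) - 48) h k
      = pvC_loop prev rest h k := by
  intro rest
  induction rest with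
  | nil => intro prev h k _ _; rfl
  | cons d rest ih =>
    intro prev h k hp hr
    have hd : pvIsDig d := hr d (by simp)
    have hrest : ∀ c ∈ rest, pvIsDig c := fun c hc => hr c (by simp [hc])
    simp only [List.map_cons, pvA_loop, pvC_loop]
    have h1 : ((d.toNat : Int) - 48 < (prev.toNat : Int) - 48) ↔ d < prev := by
      rw [pv_char_lt_iff]; omega
    have h2 : ((d.toNat : Int) - 48 = (prev.toNat : Int) - 48) ↔ d = prev := by
      constructor
      · intro he; exact pv_char_eq_of_toNat d prev (by omega)
      · intro he; rw [he]
    rw [if_congr h1 rfl rfl, if_congr h2 rfl rfl]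
    by_cases c1 : d < prev
    · rw [if_pos c1, if_pos c1]
    · rw [if_neg c1, if_neg c1]
      by_cases c2 : d = prev
      · rw [if_pos c2, if_pos c2]; exact ih d h (k + 1) hd hrest
      · rw [if_neg c2, if_neg c2]; exact ih d (if k = 2 then true else h) 1 hd hrest

-- non-decreasing adjacent characters (A's early-return condition)
def pvNd : List Char → Bool
  | [] => true
  | [_] => true
  | a :: b :: t => !(decide (b < a)) && pvNd (b :: t)

-- add k-1 to the length of the first run (the pending run A is still counting)
def pvBump : List (Char × Int) → Int → List (Char × Int)
  | [], _ => []
  | (c, m) :: r, k => (c, m + k - 1) :: r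

theorem pv_runs_shape (c : Char) (cs : List Char) :
    ∃ m r, pvB_runs (c :: cs) = (c, m) :: r := by
  rw [pvB_runs]
  rcases hcs : pvB_runs cs with _ | ⟨⟨c', n⟩, r⟩
  · exact ⟨1, [], rfl⟩
  · by_cases h : c = c'
    · exact ⟨n + 1, r, by simp [h]⟩
    · exact ⟨1, (c', n) :: r, by simp [h]⟩

theorem pv_L : ∀ (rest : List Char) (c : Char) (h : Bool) (k : Int),
    pvC_loop c rest h k =
      if pvNd (c :: rest) then h || ((pvBump (pvB_runs (c :: rest)) k).any fun p => p.2 == 2)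
      else false := by
  intro rest
  induction rest with
  | nil =>
    intro c h k
    have e : (1 : Int) + k - 1 = k := by ring
    simp only [pvC_loop, pvNd, pvB_runs, pvBump, e, List.any_cons, List.any_nil,
      Bool.or_false, if_true]
    cases h <;> by_cases hk : k = 2 <;> simp [hk]
  | cons d rest ih =>
    intro c h k
    obtain ⟨m, r, hr⟩ := pv_runs_shape d rest
    by_cases hlt : d < c
    · have hnd : pvNd (c :: d :: rest) = false := by simp [pvNd, hlt]
      simp [pvC_loop, hlt, hnd]
    · by_cases heq : d = c
      · subst heq
        have e1 : pvB_runs (d :: d :: rest) = (d, m + 1) :: r := by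
          rw [pvB_runs, hr]; simp
        have e2 : pvNd (d :: d :: rest) = pvNd (d :: rest) := by
          simp [pvNd]
        conv_lhs => rw [pvC_loop]
        rw [if_neg hlt, if_pos rfl, ih d h (k + 1), hr, e1, e2]
        simp only [pvBump]
        have e3 : m + (k + 1) - 1 = m + 1 + k - 1 := by ring
        rw [e3]
      · have hne : c ≠ d := fun hh => heq hh.symm
        have e1 : pvB_runs (c :: d :: rest) = (c, 1) :: (d, m) :: r := by
          rw [pvB_runs, hr]; simp [hne]
        have e2 : pvNd (c :: d :: rest) = pvNd (d :: rest) := by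
          simp [pvNd, hlt]
        conv_lhs => rw [pvC_loop]
        rw [if_neg hlt, if_neg heq, ih d (if k = 2 then true else h) 1, hr, e1, e2]
        simp only [pvBump, List.any_cons]
        have e3 : m + 1 - 1 = m := by ring
        have e4 : (1 : Int) + k - 1 = k := by ring
        rw [e3, e4]
        by_cases hnd : pvNd (d :: rest)
        · simp only [hnd, if_true]
          cases h <;> by_cases hk : k = 2 <;> simp [hk]
        · simp [hnd]

theorem pv_pairInc_head (c : Char) (m m' : Int) (r : List (Char × Int)) :
    ((((c, m) :: r).zip (((c, m) :: r).tail)).all fun p => decide (p.1.1 < p.2.1))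
      = ((((c, m') :: r).zip (((c, m') :: r).tail)).all fun p => decide (p.1.1 < p.2.1)) := by
  cases r <;> simp [List.zip_cons_cons]

theorem pv_pairInc_runs : ∀ (l : List Char),
    (((pvB_runs l).zip (pvB_runs l).tail).all fun p => decide (p.1.1 < p.2.1)) = pvNd l := by
  intro l
  induction l with
  | nil => rfl
  | cons c cs ih =>
    cases cs with
    | nil => rfl
    | cons d t =>
      obtain ⟨m, r, hr⟩ := pv_runs_shape d t
      rw [hr] at ih
      by_cases h : c = d
      · subst h
        have e1 : pvB_runs (c :: c :: t) = (c, m + 1) :: r := by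
          rw [pvB_runs, hr]; simp
        have e2 : pvNd (c :: c :: t) = pvNd (c :: t) := by simp [pvNd]
        rw [e1, e2, ← ih]
        exact pv_pairInc_head c (m + 1) m r
      · have e1 : pvB_runs (c :: d :: t) = (c, 1) :: (d, m) :: r := by
          rw [pvB_runs, hr]; simp [h]
        have e2 : pvNd (c :: d :: t) = (!(decide (d < c)) && pvNd (d :: t)) := by
          simp [pvNd]
        have e4 : (((((c, 1) : Char × Int) :: (d, m) :: r).zip
              ((((c, 1) : Char × Int) :: (d, m) :: r)).tail).all fun p => decide (p.1.1 < p.2.1))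
            = (decide (c < d)
                && ((((d, m) :: r).zip (((d, m) :: r)).tail).all fun p => decide (p.1.1 < p.2.1))) := by
          simp [List.zip_cons_cons]
        rw [e1, e2, e4, ih]
        have e3 : decide (c < d) = !(decide (d < c)) := by
          by_cases hcd : c < d
          · simp [hcd, asymm hcd]
          · have hdc : d < c := by
              rcases lt_trichotomy c d with h' | h' | h'
              · exact absurd h' hcd
              · exact absurd h' h
              · exact h'
            simp [hcd, hdc]
        rw [e3]

theorem pv_bump_one (r : List (Char × Int)) : pvBump r 1 = r := by
  cases r with
  | nil => rfl
  | cons p r' =>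
    obtain ⟨c, m⟩ := p
    simp only [pvBump]
    norm_num

theorem pv_valid_eq (n : Int) (hn : 0 ≤ n) : pvA_isValid n = pvB_isValid n := by
  unfold pvA_isValid pvB_isValid
  rw [PySem.Int.toList_toStr]
  have hdig := pv_toChars_digits n hn
  have hne := pv_toChars_ne_nil n hn
  rcases hcs : PySem.Int.toChars n with _ | ⟨c, rest⟩
  · exact absurd hcs hne
  rw [hcs] at hdig
  have hmap : (c :: rest).map (fun ch => (PySem.Int.ofStr? (String.ofList [ch])).getD 0)
      = (c :: rest).map (fun ch => (ch.toNat : Int) - 48) :=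
    List.map_congr_left (fun x hx => pv_ofStr_digit x (hdig x hx).1 (hdig x hx).2)
  rw [hmap]
  simp only [List.map_cons]
  rw [pv_loop_bridge rest c false 1 (hdig c (by simp)) (fun x hx => hdig x (by simp [hx]))]
  rw [pv_L rest c false 1, pv_bump_one, pv_pairInc_runs (c :: rest)]
  cases hnd : pvNd (c :: rest) <;> simp

theorem pv_foldA (xs : List Int) : ∀ (acc : Int),
    xs.foldl (fun a num => if pvA_isValid num then a + 1 else a) acc
      = acc + (xs.countP fun num => pvA_isValid num : Nat) := by
  induction xs with
  | nil => intro acc; simp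
  | cons x xs ih =>
    intro acc
    simp only [List.foldl_cons, List.countP_cons]
    rw [ih]
    cases hv : pvA_isValid x <;> simp [hv] <;> push_cast <;> ring

theorem pv_loopB_eq (lo : Int) : ∀ (num total : Int),
    pvB_loop lo num total
      = total + ((PySem.List.pyRange lo (num + 1) 1).countP fun n => pvB_isValid n : Nat) := by
  have H : ∀ (k : Nat) (num total : Int), (num + 1 - lo).toNat = k →
      pvB_loop lo num total
        = total + ((PySem.List.pyRange lo (num + 1) 1).countP fun n => pvB_isValid n : Nat) := by
    intro k
    induction k with
    | zero =>
      intro num total hk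
      rw [pvB_loop, if_neg (by omega), PySem.List.pyRange_one_eq_nil (by omega)]
      simp
    | succ k ih =>
      intro num total hk
      have hge : num ≥ lo := by omega
      rw [pvB_loop, if_pos hge]
      rw [ih (num - 1) _ (by omega)]
      have e : num - 1 + 1 = num := by ring
      rw [e, PySem.List.pyRange_one_succ_right hge, List.countP_append]
      cases hv : pvB_isValid num <;> simp [hv] <;> push_cast <;> ring
  exact fun num total => H _ num total rfl

-- ===== VERDICT (by name: the statement is the Claim_ definition above) =====
theorem count_valid_numbers_spec : Claim_equal_count_valid_numbers := by
  intro l u _ hpre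
  unfold Spec_count_valid_numbers count_valid_numbers count_valid_numbers_alt
  rw [pv_foldA, pv_loopB_eq]
  have e : u - 1 + 1 = u := by ring
  rw [e]
  simp only [zero_add]
  rcases hpre with hl | hu
  · rw [max_eq_left (by omega : (0 : Int) ≤ l)]
    congr 1
    apply List.countP_congr
    intro x hx
    have hx' : l ≤ x := (PySem.List.mem_pyRange_one.mp hx).1
    rw [pv_valid_eq x (by omega)]
  · rw [PySem.List.pyRange_one_eq_nil hu, PySem.List.pyRange_one_eq_nil (by omega : u ≤ max l 0)]
    simp

@[simp] theorem count_valid_numbers_raises : Claim_raises_count_valid_numbers := by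
  unfold Claim_raises_count_valid_numbers
  constructor
  · intro l u _ hr
    unfold Raises_count_valid_numbers at hr
    unfold Pre_count_valid_numbers
    omega
  · refine ⟨by decide, by decide, ?_⟩
    show count_valid_numbers_alt (-5) 23 = 2
    unfold count_valid_numbers_alt
    rw [pv_loopB_eq]
    decide
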